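-- pv_equiv track=rewrite | github.com/nandunanduu/PYTHON-WORKSHOP-PROGRAMS | Program to seperate alpha,numbers,symbols from a string python.py | seperate_char
-- ===== SOURCE A (Python) =====
-- def seperate_char(string):
--     alphabets=""
--     numbers=""
--     symbols=""
--
--     for ch in string:
--         if ch.isalpha():
--            alphabets+=ch
--         elif ch.isdigit():
--            numbers+=ch
--         else:
--             symbols+=ch
--
--     return alphabets, numbers, symbols
-- ===== SOURCE B (Python) =====
-- def seperate_char(string):
--     alphabets = "".join(c for c in string if c.isalpha())
--     numbers = "".join(c for c in string if c.isdigit())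
--     symbols = "".join(c for c in string if not c.isalpha() and not c.isdigit())
--     return alphabets, numbers, symbols
-- ===== Notes on version B (the rewrite author's own statement) =====
-- stated objective: idiomatic
-- what changed: Replaces the single three-way branching loop with three independent filtered passes, each building its string with a join over a filter.
import Mathlib
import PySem

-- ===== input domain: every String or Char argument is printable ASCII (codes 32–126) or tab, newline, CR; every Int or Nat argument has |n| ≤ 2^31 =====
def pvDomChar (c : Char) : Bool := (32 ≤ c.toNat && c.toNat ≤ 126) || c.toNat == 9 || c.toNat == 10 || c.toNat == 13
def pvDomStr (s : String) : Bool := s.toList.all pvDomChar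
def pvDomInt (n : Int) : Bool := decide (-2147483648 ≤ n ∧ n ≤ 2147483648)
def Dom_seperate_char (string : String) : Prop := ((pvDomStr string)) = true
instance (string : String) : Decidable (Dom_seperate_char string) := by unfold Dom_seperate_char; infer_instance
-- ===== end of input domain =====

-- B replaces A's single three-way branching loop by three independent filtered passes (idiomatic decomposition; same cost).


-- ===== PORT A =====
-- one pass, three accumulators, branches in A's order
def seperate_char (string : String) : String × String × String :=
  let r := string.toList.foldl
    (fun (acc : List Char × List Char × List Char) ch =>
      if PySem.Chars.isalpha ch then (acc.1 ++ [ch], acc.2.1, acc.2.2)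
      else if PySem.Chars.isdigit ch then (acc.1, acc.2.1 ++ [ch], acc.2.2)
      else (acc.1, acc.2.1, acc.2.2 ++ [ch]))
    ([], [], [])
  (String.ofList r.1, String.ofList r.2.1, String.ofList r.2.2)

-- ===== PORT B =====
-- three independent filtered passes
def seperate_char_alt (string : String) : String × String × String :=
  (String.ofList (string.toList.filter (fun c => PySem.Chars.isalpha c)),
   String.ofList (string.toList.filter (fun c => PySem.Chars.isdigit c)),
   String.ofList (string.toList.filter (fun c => !PySem.Chars.isalpha c && !PySem.Chars.isdigit c)))

-- ===== PRECONDITION & SPEC =====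
def Spec_seperate_char (string : String) (out : String × String × String) : Prop := out = seperate_char_alt string
instance (string : String) (out : String × String × String) : Decidable (Spec_seperate_char string out) := by unfold Spec_seperate_char; infer_instance

-- ===== CLAIM (what is proved, stated in full; the proofs are below) =====
def Claim_equal_seperate_char : Prop := ∀ (string : String), Dom_seperate_char string → Spec_seperate_char string (seperate_char string)

-- ===== LEMMAS AND PROOFS =====
theorem alpha_not_digit (c : Char) (h : PySem.Chars.isalpha c = true) :
    PySem.Chars.isdigit c = false := by
  simp only [PySem.Chars.isalpha, PySem.Chars.isupper, PySem.Chars.islower, PySem.Chars.isdigit,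
    Char.le_def, UInt32.le_iff_toNat_le, Bool.or_eq_true, Bool.and_eq_true, decide_eq_true_eq] at *
  simp only [Bool.and_eq_false_iff, decide_eq_false_iff_not, not_le]
  have h0 : ('0' : Char).val.toNat = 48 := rfl
  have h9 : ('9' : Char).val.toNat = 57 := rfl
  have hA : ('A' : Char).val.toNat = 65 := rfl
  have hZ : ('Z' : Char).val.toNat = 90 := rfl
  have ha : ('a' : Char).val.toNat = 97 := rfl
  have hz : ('z' : Char).val.toNat = 122 := rfl
  omega
theorem seperate_foldl_eq (l : List Char) (a b c : List Char) :
    l.foldl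
      (fun (acc : List Char × List Char × List Char) ch =>
        if PySem.Chars.isalpha ch then (acc.1 ++ [ch], acc.2.1, acc.2.2)
        else if PySem.Chars.isdigit ch then (acc.1, acc.2.1 ++ [ch], acc.2.2)
        else (acc.1, acc.2.1, acc.2.2 ++ [ch]))
      (a, b, c)
    = (a ++ l.filter (fun ch => PySem.Chars.isalpha ch),
       b ++ l.filter (fun ch => PySem.Chars.isdigit ch),
       c ++ l.filter (fun ch => !PySem.Chars.isalpha ch && !PySem.Chars.isdigit ch)) := by
  induction l generalizing a b c with
  | nil => simp
  | cons x xs ih =>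
    simp only [List.foldl_cons, List.filter_cons]
    by_cases ha : PySem.Chars.isalpha x
    · simp [ha, alpha_not_digit _ ha, ih]
    · by_cases hd : PySem.Chars.isdigit x
      · simp [ha, hd, ih]
      · simp [ha, hd, ih]

-- ===== VERDICT (by name: the statement is the Claim_ definition above) =====
theorem seperate_char_spec : Claim_equal_seperate_char := by
  intro s _
  unfold Spec_seperate_char seperate_char seperate_char_alt
  simp [seperate_foldl_eq]
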